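-- pv_equiv track=rewrite | github.com/brandonlemley90-sys/SubmittalBuilderApp | GroundingandBondingBuilder.py | get_base_model_to_last_digit
-- ===== SOURCE A (Python) =====
-- def get_base_model_to_last_digit(clean_tok):
--     last = -1
--     for i, ch in enumerate(clean_tok):
--         if ch.isdigit():
--             last = i
--     if last == -1:
--         return ''
--     return clean_tok[:last + 1]
-- ===== SOURCE B (Python) =====
-- def get_base_model_to_last_digit(clean_tok):
--     i = len(clean_tok)
--     while i > 0 and not clean_tok[i - 1].isdigit():
--         i -= 1
--     return clean_tok[:i]
-- ===== Notes on version B (the rewrite author's own statement) =====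
-- stated objective: alternative
-- what changed: A scans the whole string forward with enumerate, accumulating the index of the last digit, then slices; B scans an index backward from the end and stops at the first digit it meets, returning clean_tok[:i] (which is '' when no digit exists), so no last-index accumulator and no full traversal.
import Mathlib
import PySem

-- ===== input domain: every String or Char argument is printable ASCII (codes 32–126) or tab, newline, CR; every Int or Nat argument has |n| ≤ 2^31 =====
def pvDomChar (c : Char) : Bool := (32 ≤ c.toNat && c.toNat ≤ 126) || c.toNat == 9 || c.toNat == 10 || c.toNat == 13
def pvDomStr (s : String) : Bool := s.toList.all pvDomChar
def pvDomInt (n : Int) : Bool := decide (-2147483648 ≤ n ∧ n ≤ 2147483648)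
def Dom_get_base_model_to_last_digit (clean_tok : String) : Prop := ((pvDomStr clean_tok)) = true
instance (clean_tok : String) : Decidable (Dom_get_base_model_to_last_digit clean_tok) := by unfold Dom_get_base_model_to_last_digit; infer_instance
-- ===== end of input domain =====

-- B replaces A's full forward scan tracking the last digit index with a backward
-- index scan from the end that stops at the first digit and slices there (simpler).

-- ===== PORT A =====
-- A: forward enumerate loop remembering the index of the last digit, then slice.
def get_base_model_to_last_digit (clean_tok : String) : String :=
  let last : Int := (PySem.List.enumerate clean_tok.toList 0).foldl
    (fun last p => if PySem.Chars.isdigit p.2 then p.1 else last) (-1)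
  if last = -1 then "" else PySem.Str.slice clean_tok none (some (last + 1))

-- ===== PORT B =====
-- B: i starts at len(clean_tok); while i > 0 and clean_tok[i-1] is not a digit,
-- decrement i; return clean_tok[:i].
def pvAltLoop (clean_tok : String) (i : Int) : Int :=
  if h : 0 < i ∧ ¬ (PySem.Str.pyGet? clean_tok (i - 1)).any PySem.Chars.isdigit then
    pvAltLoop clean_tok (i - 1)
  else i
termination_by i.toNat
decreasing_by omega

def get_base_model_to_last_digit_alt (clean_tok : String) : String :=
  PySem.Str.slice clean_tok none (some (pvAltLoop clean_tok (PySem.Str.len clean_tok)))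

-- ===== PRECONDITION & SPEC =====
def Spec_get_base_model_to_last_digit (clean_tok : String) (out : String) : Prop := out = get_base_model_to_last_digit_alt clean_tok
instance (clean_tok : String) (out : String) : Decidable (Spec_get_base_model_to_last_digit clean_tok out) := by unfold Spec_get_base_model_to_last_digit; infer_instance

-- ===== CLAIM (what is proved, stated in full; the proofs are below) =====
def Claim_equal_get_base_model_to_last_digit : Prop := ∀ (clean_tok : String), Dom_get_base_model_to_last_digit clean_tok → Spec_get_base_model_to_last_digit clean_tok (get_base_model_to_last_digit clean_tok)

-- ===== LEMMAS AND PROOFS =====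
-- A's loop state after the whole scan, as a function of the char list.
def pvLastA (cs : List Char) : Int :=
  (PySem.List.enumerate cs 0).foldl
    (fun last p => if PySem.Chars.isdigit p.2 then p.1 else last) (-1)

-- B's loop, mirrored on the char list (pvAltLoop_eq_loopL connects them).
def pvLoopL (cs : List Char) (i : Int) : Int :=
  if h : 0 < i ∧ ¬ (PySem.List.pyGet? cs (i - 1)).any PySem.Chars.isdigit then
    pvLoopL cs (i - 1)
  else i
termination_by i.toNat
decreasing_by omega

theorem pvAltLoop_eq_loopL (s : String) : ∀ (n : Nat) (i : Int), i.toNat ≤ n →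
    pvAltLoop s i = pvLoopL s.toList i := by
  intro n
  induction n with
  | zero =>
    intro i hi
    rw [pvAltLoop, pvLoopL]
    have h0 : ¬ (0 : Int) < i := by omega
    rw [dif_neg (by tauto), dif_neg (by tauto)]
  | succ n ih =>
    intro i hi
    rw [pvAltLoop, pvLoopL]
    simp only [PySem.Str.pyGet?_eq, PySem.Chars.pyGet?_eq_listPyGet?]
    by_cases h : 0 < i ∧ ¬ (PySem.List.pyGet? s.toList (i - 1)).any PySem.Chars.isdigit
    · rw [dif_pos h, dif_pos h]
      exact ih (i - 1) (by omega)
    · rw [dif_neg h, dif_neg h]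

theorem pvLastA_concat (ds : List Char) (c : Char) :
    pvLastA (ds ++ [c]) = if PySem.Chars.isdigit c then (ds.length : Int) else pvLastA ds := by
  simp [pvLastA, PySem.List.enumerate_append, List.foldl_append, PySem.List.enumerate]

theorem pvGet_append_left (ds : List Char) (c : Char) (k : Int)
    (h0 : 0 ≤ k) (h1 : k < ds.length) :
    PySem.List.pyGet? (ds ++ [c]) k = PySem.List.pyGet? ds k := by
  obtain ⟨n, rfl⟩ : ∃ n : Nat, k = (n : Int) := ⟨k.toNat, by omega⟩
  rw [PySem.List.pyGet?_natCast, PySem.List.pyGet?_natCast]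
  exact List.getElem?_append_left (by exact_mod_cast h1)

theorem pvLoopL_append (ds : List Char) (c : Char) : ∀ (n : Nat) (i : Int), i.toNat ≤ n →
    i ≤ ds.length → pvLoopL (ds ++ [c]) i = pvLoopL ds i := by
  intro n
  induction n with
  | zero =>
    intro i hi _
    rw [pvLoopL]
    conv_rhs => rw [pvLoopL]
    have h0 : ¬ (0 : Int) < i := by omega
    rw [dif_neg (by tauto), dif_neg (by tauto)]
  | succ n ih =>
    intro i hi hle
    rw [pvLoopL]
    conv_rhs => rw [pvLoopL]
    by_cases h0 : 0 < i
    · rw [pvGet_append_left ds c (i - 1) (by omega) (by omega)]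
      by_cases hc : ¬ (PySem.List.pyGet? ds (i - 1)).any PySem.Chars.isdigit
      · rw [dif_pos ⟨h0, hc⟩, dif_pos ⟨h0, hc⟩]
        exact ih (i - 1) (by omega) (by omega)
      · rw [dif_neg (by tauto), dif_neg (by tauto)]
    · rw [dif_neg (by tauto), dif_neg (by tauto)]

theorem pvCoreLoop : ∀ cs : List Char, pvLoopL cs (cs.length : Int) = pvLastA cs + 1 := by
  intro cs
  induction cs using List.reverseRecOn with
  | nil => rw [pvLoopL]; rfl
  | append_singleton ds c ih =>
    rw [pvLastA_concat]
    have hlen : ((ds ++ [c]).length : Int) = (ds.length : Int) + 1 := by simp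
    rw [hlen, pvLoopL]
    have hget : PySem.List.pyGet? (ds ++ [c]) ((ds.length : Int) + 1 - 1) = some c := by
      rw [show (ds.length : Int) + 1 - 1 = ((ds.length : Nat) : Int) by omega,
        PySem.List.pyGet?_natCast]
      simp
    rw [hget]
    by_cases hd : PySem.Chars.isdigit c
    · rw [dif_neg (by simp [hd]), if_pos hd]
    · rw [dif_pos ⟨by omega, by simp [hd]⟩, if_neg hd]
      rw [show (ds.length : Int) + 1 - 1 = (ds.length : Int) by omega,
        pvLoopL_append ds c ds.length (ds.length : Int) (by omega) (by omega), ih]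

-- ===== VERDICT (by name: the statement is the Claim_ definition above) =====
theorem get_base_model_to_last_digit_spec : Claim_equal_get_base_model_to_last_digit := by
  intro s _
  unfold Spec_get_base_model_to_last_digit get_base_model_to_last_digit get_base_model_to_last_digit_alt
  have hloop : pvAltLoop s (PySem.Str.len s) = pvLastA s.toList + 1 := by
    rw [PySem.Str.len_eq, pvAltLoop_eq_loopL s (s.toList.length) _ (by omega), pvCoreLoop]
  rw [hloop]
  show (if pvLastA s.toList = -1 then "" else PySem.Str.slice s none (some (pvLastA s.toList + 1))) = _
  by_cases h : pvLastA s.toList = -1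
  · rw [if_pos h, h]
    refine String.toList_inj.mp ?_
    simp [PySem.List.slice]
  · rw [if_neg h]
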